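-- pv_equiv track=rewrite | github.com/Whem/lotteryGuesser | src/LotteryGuesserDjango/processors/equal_interval_spacing_prediction.py | _deterministic_fill
-- ===== SOURCE A (Python) =====
-- from typing import List, Tuple
--
-- def _deterministic_fill(min_num: int, max_num: int, needed: int, base: List[int]) -> List[int]:
--     seen = set()
--     filtered: List[int] = []
--     for n in base:
--         if min_num <= n <= max_num and n not in seen:
--             seen.add(n)
--             filtered.append(n)
--     if len(filtered) < needed:
--         remain = [n for n in range(min_num, max_num + 1) if n not in seen]
--         filtered.extend(remain[: needed - len(filtered)])
--     return sorted(filtered)[:needed]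
-- ===== SOURCE B (Python) =====
-- from typing import List
--
-- def _deterministic_fill(min_num: int, max_num: int, needed: int, base: List[int]) -> List[int]:
--     members = {n for n in base if min_num <= n <= max_num}
--     k = needed - len(members)
--     if k <= 0:
--         return sorted(members)[:needed]
--     out: List[int] = []
--     fills = 0
--     for i in range(min_num, max_num + 1):
--         if i in members:
--             out.append(i)
--         elif fills < k:
--             out.append(i)
--             fills += 1
--     return out  # at most `needed` elements, already ascending
-- ===== Notes on version B (the rewrite author's own statement) =====
-- stated objective: alternative
-- what changed: B builds the in-range member set once and, when fillers are needed, replaces A's dedup-list + range-filter + extend + final sort by a single ascending walk over range(min_num, max_num+1) that emits members and capped fillers already in sorted order; with no fillers needed it returns the needed smallest members directly without ever touching the range.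
import Mathlib
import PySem

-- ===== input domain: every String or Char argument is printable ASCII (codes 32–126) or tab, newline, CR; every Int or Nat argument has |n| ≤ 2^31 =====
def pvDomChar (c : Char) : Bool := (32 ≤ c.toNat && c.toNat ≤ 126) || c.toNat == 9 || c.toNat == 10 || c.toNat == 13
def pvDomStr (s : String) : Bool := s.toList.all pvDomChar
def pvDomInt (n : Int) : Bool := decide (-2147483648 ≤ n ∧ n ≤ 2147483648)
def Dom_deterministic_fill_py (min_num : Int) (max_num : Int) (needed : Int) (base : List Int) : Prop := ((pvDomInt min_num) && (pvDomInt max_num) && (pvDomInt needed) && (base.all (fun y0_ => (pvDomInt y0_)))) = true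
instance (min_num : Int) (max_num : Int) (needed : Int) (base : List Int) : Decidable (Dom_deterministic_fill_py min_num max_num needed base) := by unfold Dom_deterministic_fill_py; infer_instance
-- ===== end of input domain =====

-- B replaces A's dedup + conditional range-fill + final sort by one ascending walk over the
-- range that emits set members and capped fillers, producing the result already sorted (alternative decomposition).


-- ===== PORT A =====
-- one step of A's dedup loop over base: seen/filtered updated when n is in range and unseen
def aStep (min_num : Int) (max_num : Int) (acc : PySem.Set Int × List Int) (n : Int) : PySem.Set Int × List Int :=
  if min_num ≤ n ∧ n ≤ max_num ∧ n ∉ acc.1 then (PySem.Set.add acc.1 n, acc.2 ++ [n]) else acc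

def deterministic_fill_py (min_num : Int) (max_num : Int) (needed : Int) (base : List Int) : List Int :=
  let sf := base.foldl (aStep min_num max_num) (PySem.Set.empty, [])
  let filtered :=
    if (sf.2.length : Int) < needed then
      sf.2 ++ PySem.List.slice
        ((PySem.List.pyRange min_num (max_num + 1) 1).filter (fun n => !PySem.Set.contains sf.1 n))
        none (some (needed - (sf.2.length : Int)))
    else sf.2
  PySem.List.slice (PySem.List.sorted filtered (fun x => x) false) none (some needed)

-- ===== PORT B =====
-- one step of B's ascending walk: emit i when it is a member, else when fills remain
def bStep (members : PySem.Set Int) (fills_allowed : Int) (acc : List Int × Int) (i : Int) : List Int × Int :=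
  if PySem.Set.contains members i then (acc.1 ++ [i], acc.2)
  else if acc.2 < fills_allowed then (acc.1 ++ [i], acc.2 + 1)
  else acc

-- B's range test, as the Python comprehension's condition
def inRangeB (min_num : Int) (max_num : Int) (n : Int) : Bool := decide (min_num ≤ n ∧ n ≤ max_num)

def deterministic_fill_py_alt (min_num : Int) (max_num : Int) (needed : Int) (base : List Int) : List Int :=
  let members : PySem.Set Int :=
    PySem.Set.ofList (base.filter (inRangeB min_num max_num))
  let k := needed - (members.length : Int)
  if k ≤ 0 then
    PySem.List.slice (PySem.List.sorted members (fun x => x) false) none (some needed)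
  else
    ((PySem.List.pyRange min_num (max_num + 1) 1).foldl (bStep members k) ([], 0)).1

-- ===== PRECONDITION & SPEC =====
def Spec_deterministic_fill_py (min_num : Int) (max_num : Int) (needed : Int) (base : List Int) (out : List Int) : Prop := out = deterministic_fill_py_alt min_num max_num needed base
instance (min_num : Int) (max_num : Int) (needed : Int) (base : List Int) (out : List Int) : Decidable (Spec_deterministic_fill_py min_num max_num needed base out) := by unfold Spec_deterministic_fill_py; infer_instance

-- ===== CLAIM (what is proved, stated in full; the proofs are below) =====
def Claim_equal_deterministic_fill_py : Prop := ∀ (min_num : Int) (max_num : Int) (needed : Int) (base : List Int), Dom_deterministic_fill_py min_num max_num needed base → Spec_deterministic_fill_py min_num max_num needed base (deterministic_fill_py min_num max_num needed base)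

-- ===== LEMMAS AND PROOFS =====

-- recursive description of B's walk output
def gWalk (S : PySem.Set Int) (k : Int) : List Int → Int → List Int
  | [], _ => []
  | i :: t, f =>
    if PySem.Set.contains S i then i :: gWalk S k t f
    else if f < k then i :: gWalk S k t (f + 1)
    else gWalk S k t f

lemma foldB_eq (S : PySem.Set Int) (k : Int) (l : List Int) (out : List Int) (f : Int) :
    (l.foldl (bStep S k) (out, f)).1 = out ++ gWalk S k l f := by
  induction l generalizing out f with
  | nil => simp [gWalk]
  | cons i t ih =>
    simp only [List.foldl_cons, bStep, gWalk]
    by_cases h1 : i ∈ S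
    · simp [h1, ih]
    · by_cases h2 : f < k <;> simp [h1, h2, ih]

lemma gWalk_sublist (S : PySem.Set Int) (k : Int) (l : List Int) (f : Int) :
    (gWalk S k l f).Sublist l := by
  induction l generalizing f with
  | nil => simp [gWalk]
  | cons i t ih =>
    simp only [gWalk]
    by_cases h1 : i ∈ S
    · simpa [h1] using (ih f).cons₂ i
    · by_cases h2 : f < k
      · simpa [h1, h2] using (ih (f + 1)).cons₂ i
      · simpa [h1, h2] using (ih f).cons i

lemma gWalk_perm (S : PySem.Set Int) (k : Int) (l : List Int) (f : Int) :
    (gWalk S k l f).Perm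
      (l.filter (fun i => PySem.Set.contains S i) ++
        (l.filter (fun i => !PySem.Set.contains S i)).take (k - f).toNat) := by
  induction l generalizing f with
  | nil => simp [gWalk]
  | cons i t ih =>
    simp only [gWalk, List.filter_cons]
    by_cases h1 : i ∈ S
    · simpa [h1] using (ih f).cons i
    · by_cases h2 : f < k
      · have hc : PySem.Set.contains S i = false := by simp [h1]
        have htn : (k - f).toNat = (k - (f + 1)).toNat + 1 := by omega
        simp only [hc, h2, htn, if_true, if_false, Bool.not_false, List.take_succ_cons,
          Bool.false_eq_true]
        exact ((ih (f + 1)).cons i).trans List.perm_middle.symm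
      · have htn : (k - f).toNat = 0 := by omega
        simpa [h1, h2, htn] using ih f

-- A's dedup loop: seen and filtered stay equal, and accumulate Set.update
lemma foldA_eq (min_num max_num : Int) (base : List Int) (s : PySem.Set Int) :
    base.foldl (aStep min_num max_num) (s, s) =
      (PySem.Set.update s (base.filter (inRangeB min_num max_num)),
       PySem.Set.update s (base.filter (inRangeB min_num max_num))) := by
  induction base generalizing s with
  | nil => simp [PySem.Set.update]
  | cons n t ih =>
    simp only [List.foldl_cons, aStep, List.filter_cons]
    by_cases hr : min_num ≤ n ∧ n ≤ max_num
    · have hrb : inRangeB min_num max_num n = true := by simp [inRangeB, hr]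
      by_cases hm : n ∈ s
      · simp [hr, hrb, hm, PySem.Set.update_cons, ih]
      · simp [hr, hrb, hm, PySem.Set.update_cons, ih]
    · have hrb : inRangeB min_num max_num n = false := by simp [inRangeB, hr]
      rw [if_neg (fun h => hr ⟨h.1, h.2.1⟩)]
      simp [hrb, ih]

lemma perm_filter_range (min_num max_num : Int) (base : List Int)
    (S : PySem.Set Int)
    (hS : S = PySem.Set.ofList (base.filter (inRangeB min_num max_num))) :
    ((PySem.List.pyRange min_num (max_num + 1) 1).filter
      (fun i => PySem.Set.contains S i)).Perm (S : List Int) := by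
  have hnodupS : (S : List Int).Nodup := by rw [hS]; exact PySem.Set.nodup_ofList _
  have hrange_nodup : (PySem.List.pyRange min_num (max_num + 1) 1).Nodup :=
    PySem.List.nodup_pyRange_one _ _
  rw [List.perm_ext_iff_of_nodup (hrange_nodup.filter _) hnodupS]
  intro x
  simp only [List.mem_filter, PySem.List.mem_pyRange_one, PySem.Set.contains_iff]
  constructor
  · exact fun h => h.2
  · intro hx
    refine ⟨?_, hx⟩
    have : x ∈ base.filter (inRangeB min_num max_num) := by
      rw [hS] at hx; exact (PySem.Set.mem_ofList _ _).1 hx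
    have := List.of_mem_filter this
    simp only [inRangeB, decide_eq_true_eq] at this
    omega

lemma sorted_eq_gWalk (min_num max_num needed : Int) (base : List Int)
    (S : PySem.Set Int)
    (hS : S = PySem.Set.ofList (base.filter (inRangeB min_num max_num)))
    (k : Int) (hk : k = needed - ((S : List Int).length : Int)) (hkpos : 0 < k) :
    PySem.List.sorted
      ((S : List Int) ++ ((PySem.List.pyRange min_num (max_num + 1) 1).filter
          (fun n => !PySem.Set.contains S n)).take (needed - ((S : List Int).length : Int)).toNat)
      (fun x => x) false =
      gWalk S k (PySem.List.pyRange min_num (max_num + 1) 1) 0 := by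
  have hperm_S := perm_filter_range min_num max_num base S hS
  have hgperm := gWalk_perm S k (PySem.List.pyRange min_num (max_num + 1) 1) 0
  have hpair : (gWalk S k (PySem.List.pyRange min_num (max_num + 1) 1) 0).Pairwise
      (fun a b : Int => (fun x : Int => x) a < (fun x : Int => x) b) :=
    List.Pairwise.sublist (gWalk_sublist _ _ _ _) (PySem.List.pairwise_lt_pyRange_one _ _)
  refine PySem.List.sorted_eq_of_perm_of_pairwise_lt _ _ _ ?_ hpair
  refine hgperm.trans ?_
  have hsub : k - 0 = needed - ((S : List Int).length : Int) := by omega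
  rw [hsub]
  exact List.Perm.append_right _ hperm_S

lemma gWalk_length_le (min_num max_num needed : Int) (base : List Int)
    (S : PySem.Set Int)
    (hS : S = PySem.Set.ofList (base.filter (inRangeB min_num max_num)))
    (k : Int) (hk : k = needed - ((S : List Int).length : Int)) (hkpos : 0 < k) :
    (gWalk S k (PySem.List.pyRange min_num (max_num + 1) 1) 0).length ≤ needed.toNat := by
  have hperm_S := perm_filter_range min_num max_num base S hS
  have hgperm := gWalk_perm S k (PySem.List.pyRange min_num (max_num + 1) 1) 0
  have h1 := hgperm.length_eq
  have h2 := hperm_S.length_eq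
  rw [List.length_append, List.length_take] at h1
  omega

-- ===== VERDICT (by name: the statement is the Claim_ definition above) =====
theorem deterministic_fill_py_spec : Claim_equal_deterministic_fill_py := by
  intro min_num max_num needed base _
  unfold Spec_deterministic_fill_py deterministic_fill_py deterministic_fill_py_alt
  set S : PySem.Set Int :=
    PySem.Set.ofList (base.filter (inRangeB min_num max_num)) with hS
  have hfoldA : base.foldl (aStep min_num max_num) (PySem.Set.empty, []) = (S, S) := by
    have := foldA_eq min_num max_num base PySem.Set.empty
    simpa [PySem.Set.empty, PySem.Set.update_nil_left, hS] using this
  simp only [hfoldA, foldB_eq, List.nil_append]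
  by_cases hlt : ((S : List Int).length : Int) < needed
  · have hkpos : 0 < needed - ((S : List Int).length : Int) := by omega
    have hkle : ¬ (needed - ((S : List Int).length : Int) ≤ 0) := by omega
    simp only [hlt, hkle, if_true, if_false]
    have h0 : (0:Int) ≤ needed - ((S : List Int).length : Int) := by omega
    rw [PySem.List.slice_to _ h0]
    rw [sorted_eq_gWalk min_num max_num needed base S hS _ rfl hkpos]
    have hlen := gWalk_length_le min_num max_num needed base S hS _ rfl hkpos
    rw [PySem.List.slice_to _ (by omega : (0:Int) ≤ needed), List.take_of_length_le hlen]
  · have hkle : needed - ((S : List Int).length : Int) ≤ 0 := by omega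
    simp only [hlt, hkle, if_true, if_false]
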